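-- pv_equiv track=rewrite | github.com/deolla/alx-interview | 0x04-utf8_validation/0-validate_utf8.py | validUTF8
-- ===== SOURCE A (Python) =====
-- def validUTF8(data):
--     """Return: True if data is a valid UTF-8 encoding, else return False."""
--     bytes = 0
--
--     for i in range(len(data)):
--         byte = data[i] & 0xFF
--         if bytes == 0:
--             if byte >> 5 == 0b110:
--                 bytes = 1
--             elif byte >> 4 == 0b1110:
--                 bytes = 2
--             elif byte >> 3 == 0b11110:
--                 bytes = 3
--             elif byte >> 7 == 1:
--                 return False
--         else:
--             if byte >> 6 != 0b10:
--                 return False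
--             bytes -= 1
--     return bytes == 0
-- ===== SOURCE B (Python) =====
-- def validUTF8(data):
--     """Return: True if data is a valid UTF-8 encoding, else return False."""
--     i, n = 0, len(data)
--     while i < n:
--         lead = data[i] & 0xFF
--         if lead < 0x80:
--             i += 1
--             continue
--         if lead >> 5 == 0b110:
--             need = 1
--         elif lead >> 4 == 0b1110:
--             need = 2
--         elif lead >> 3 == 0b11110:
--             need = 3
--         else:
--             return False
--         for j in range(i + 1, i + 1 + need):
--             if j >= n or (data[j] & 0xFF) >> 6 != 0b10:
--                 return False
--         i += 1 + need
--     return True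
-- ===== Notes on version B (the rewrite author's own statement) =====
-- stated objective: alternative
-- what changed: Replaces A's single pass with a pending-continuation counter by an outer loop over sequence leaders that classifies each leader by its high bits and an inner loop consuming exactly the required continuation bytes before jumping past the whole sequence.
import Mathlib
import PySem

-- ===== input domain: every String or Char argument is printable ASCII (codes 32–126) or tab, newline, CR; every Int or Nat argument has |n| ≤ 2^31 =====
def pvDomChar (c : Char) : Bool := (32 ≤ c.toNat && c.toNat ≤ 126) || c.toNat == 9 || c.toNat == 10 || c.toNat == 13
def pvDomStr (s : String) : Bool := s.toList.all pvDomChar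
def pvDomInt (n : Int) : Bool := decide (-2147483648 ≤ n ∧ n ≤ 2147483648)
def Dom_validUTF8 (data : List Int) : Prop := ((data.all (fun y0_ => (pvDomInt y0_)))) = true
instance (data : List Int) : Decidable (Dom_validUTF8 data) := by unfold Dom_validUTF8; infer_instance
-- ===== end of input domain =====

-- B restructures A's single pass with a pending-continuation counter into an outer loop over
-- sequence leaders with an inner loop checking the continuation bytes (alternative decomposition, same cost).

-- ===== PORT A =====
-- A's `for i in range(len(data))` pass; `bytes` counts continuation bytes still owed.
-- `data[i] & 0xFF` is PySem.Int.band; Python `>>` on the (nonnegative) masked byte is Lean's `>>>`.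
def validUTF8Go (l : List Int) (bytes : Int) : Bool :=
  match l with
  | [] => bytes == 0
  | d :: rest =>
    let byte := PySem.Int.band d 255
    if bytes == 0 then
      if byte >>> (5 : Nat) == 6 then validUTF8Go rest 1
      else if byte >>> (4 : Nat) == 14 then validUTF8Go rest 2
      else if byte >>> (3 : Nat) == 30 then validUTF8Go rest 3
      else if byte >>> (7 : Nat) == 1 then false
      else validUTF8Go rest bytes
    else
      if byte >>> (6 : Nat) != 2 then false
      else validUTF8Go rest (bytes - 1)

def validUTF8 (data : List Int) : Bool := validUTF8Go data 0

-- ===== PORT B =====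
-- Source B's inner `for j in range(i+1, i+1+need)` loop: are the next `k` elements continuation bytes
-- (false = Python's `return False`, covering both `j >= n` and a bad byte)?
def contOK (k : Nat) (l : List Int) : Bool :=
  match k, l with
  | 0, _ => true
  | _ + 1, [] => false
  | k + 1, c :: rest =>
    if (PySem.Int.band c 255) >>> (6 : Nat) == 2 then contOK k rest else false

-- Source B's outer `while i < n` loop over the suffix of data starting at index i;
-- `i += 1 + need` is the recursive call on `rest.drop need`.
def validUTF8AltGo (l : List Int) : Bool :=
  match l with
  | [] => true
  | d :: rest =>
    let lead := PySem.Int.band d 255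
    if lead < 128 then validUTF8AltGo rest
    else
      let need : Nat :=
        if lead >>> (5 : Nat) == 6 then 1
        else if lead >>> (4 : Nat) == 14 then 2
        else if lead >>> (3 : Nat) == 30 then 3
        else 0
      if need == 0 then false
      else if contOK need rest then validUTF8AltGo (rest.drop need)
      else false
termination_by l.length
decreasing_by
  · simp only [List.length_cons]; omega
  · simp only [List.length_cons, List.length_drop]; omega

def validUTF8_alt (data : List Int) : Bool := validUTF8AltGo data

-- ===== PRECONDITION & SPEC =====
def Spec_validUTF8 (data : List Int) (out : Bool) : Prop := out = validUTF8_alt data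
instance (data : List Int) (out : Bool) : Decidable (Spec_validUTF8 data out) := by unfold Spec_validUTF8; infer_instance

-- ===== CLAIM (what is proved, stated in full; the proofs are below) =====
def Claim_equal_validUTF8 : Prop := ∀ (data : List Int), Dom_validUTF8 data → Spec_validUTF8 data (validUTF8 data)

-- ===== LEMMAS AND PROOFS =====

-- Python's d & 0xFF equals d % 256 (floor mod) on every Int
theorem band255_eq_mod (d : Int) : PySem.Int.band d 255 = PySem.Int.mod d 256 := by
  simp only [PySem.Int.band, PySem.Int.mod]
  rw [Int.fmod_eq_emod_of_nonneg _ (by norm_num)]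
  split
  · rw [show ((255:Int).toNat = 255) from rfl, Nat.and_two_pow_sub_one_eq_mod _ 8]
    omega
  · rw [show ((255:Int).toNat = 255) from rfl, Nat.and_comm, Nat.and_two_pow_sub_one_eq_mod _ 8]
    omega

theorem altGo_nil : validUTF8AltGo [] = true := by rw [validUTF8AltGo.eq_def]

-- one unfolding of B's outer loop on a cons cell, with the `need` dispatch inlined per branch
theorem altGo_cons (d : Int) (rest : List Int) :
    validUTF8AltGo (d :: rest) =
      (if PySem.Int.band d 255 < 128 then validUTF8AltGo rest
       else if (PySem.Int.band d 255) >>> (5 : Nat) == 6 then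
         (if contOK 1 rest then validUTF8AltGo (rest.drop 1) else false)
       else if (PySem.Int.band d 255) >>> (4 : Nat) == 14 then
         (if contOK 2 rest then validUTF8AltGo (rest.drop 2) else false)
       else if (PySem.Int.band d 255) >>> (3 : Nat) == 30 then
         (if contOK 3 rest then validUTF8AltGo (rest.drop 3) else false)
       else false) := by
  rw [validUTF8AltGo.eq_def]
  split_ifs <;> simp_all

-- loop invariant: A's pass owing k continuation bytes = B after checking k continuations and jumping
theorem validUTF8Go_eq (l : List Int) : ∀ (k : Nat),
    validUTF8Go l (k : Int) =
      (if contOK k l then validUTF8AltGo (l.drop k) else false) := by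
  induction l with
  | nil =>
    intro k
    cases k with
    | zero => simp [validUTF8Go, contOK, altGo_nil]
    | succ k => simp [validUTF8Go, contOK]; omega
  | cons d rest ih =>
    intro k
    have hb : PySem.Int.band d 255 = d % 256 := by
      rw [band255_eq_mod, PySem.Int.mod_eq_emod_of_pos (by norm_num)]
    have h0 : 0 ≤ d % 256 := by omega
    have h1 : d % 256 < 256 := by omega
    cases k with
    | zero =>
      show validUTF8Go (d :: rest) ((0:Nat) : Int) = _
      rw [validUTF8Go]
      simp only [contOK, List.drop_zero, if_true]
      rw [altGo_cons]
      have ih0 : validUTF8Go rest ((0:Nat) : Int) = validUTF8AltGo rest := by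
        simpa [contOK] using ih 0
      rw [← ih 1, ← ih 2, ← ih 3, ← ih0]
      simp only [hb, Int.shiftRight_eq_div_pow, Nat.cast_zero, beq_self_eq_true, if_true,
        show ((2^5 : Nat) : Int) = 32 from rfl, show ((2^4 : Nat) : Int) = 16 from rfl,
        show ((2^3 : Nat) : Int) = 8 from rfl, show ((2^7 : Nat) : Int) = 128 from rfl,
        beq_iff_eq]
      split_ifs <;> first | rfl | omega
    | succ k =>
      show validUTF8Go (d :: rest) (((k:Nat) : Int) + 1) = _
      rw [validUTF8Go]
      simp only [contOK, hb, Int.shiftRight_eq_div_pow, List.drop_succ_cons]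
      have hne : ((k:Int) + 1 == 0) = false := by simp; omega
      simp only [hne, Bool.false_eq_true, if_false]
      by_cases hc : ((d % 256 / ((2 ^ 6 : Nat) : Int)) == 2) = true
      · simp only [hc, bne, Bool.not_true, Bool.false_eq_true, if_false, if_true,
          show (k:Int) + 1 - 1 = (k:Int) by ring]
        exact ih k
      · have hd : decide (d % 256 / 64 = 2) = false := by
          simp only [decide_eq_false_iff_not]
          intro h
          exact hc (by simpa using h)
        simp [hd]

-- ===== VERDICT (by name: the statement is the Claim_ definition above) =====
theorem validUTF8_spec : Claim_equal_validUTF8 := by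
  intro data _
  show validUTF8 data = validUTF8_alt data
  have h := validUTF8Go_eq data 0
  simpa [validUTF8, validUTF8_alt, contOK] using h
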